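-- pv_equiv track=rewrite | github.com/ftsl575/teresa | spec_classifier/batch_audit.py | issue_color
-- ===== SOURCE A (Python) =====
-- RED    = "FFC7CE"
--
-- ORANGE = "FFE0B2"
--
-- YELLOW = "FFFDE7"
--
-- PURPLE = "E1BEE7"
--
-- GREEN  = "C6EFCE"
--
-- TEAL   = "B2EBF2"   # AI mismatch
--
-- def issue_color(issues_str: str) -> str:
--     if not issues_str or issues_str == "OK":
--         return GREEN
--     if "E2:" in issues_str:
--         return RED                  # красный — нет правила
--     if "AI_MISMATCH" in issues_str:
--         return TEAL                 # голубой — AI не согласен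
--     if "MANUAL_CHECK" in issues_str:
--         return "FFE0B2"             # оранжевый — ручная проверка
--     if "AI_SUGGEST" in issues_str:
--         return "E8F5E9"             # светло-зелёный — AI предлагает вариант
--     if any(c in issues_str for c in ["E5:", "E6:", "E10:", "E11:", "E12:"]):
--         return PURPLE               # фиолетовый — логика entity
--     if any(c in issues_str for c in ["E8:", "E9:", "E7:", "E13:", "E14:"]):
--         return ORANGE               # оранжевый — hw_type проблемы
--     if "E4:" in issues_str:
--         return YELLOW               # жёлтый — state mismatch
--     if "E16:" in issues_str:
--         return "FFF9C4"             # светло-жёлтый — заглушка в слоте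
--     if "E17:" in issues_str:
--         return "FAFAFA"             # светло-серый — тип не определён
--     if "E18:" in issues_str:
--         return YELLOW               # жёлтый — LOGISTIC с физическим keyword
--     if "E15:" in issues_str:
--         return "F5F5F5"             # серый — BASE без device_type
--     return ORANGE
-- ===== SOURCE B (Python) =====
-- GREEN = "C6EFCE"
-- ORANGE = "FFE0B2"
--
-- # one left-to-right scan of the text marks which rule-classes occur, then a
-- # priority pass over the 11 classes picks the color
-- _TRIGGER_RANK = [
--     ("E2:", 0), ("AI_MISMATCH", 1), ("MANUAL_CHECK", 2), ("AI_SUGGEST", 3),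
--     ("E5:", 4), ("E6:", 4), ("E10:", 4), ("E11:", 4), ("E12:", 4),
--     ("E8:", 5), ("E9:", 5), ("E7:", 5), ("E13:", 5), ("E14:", 5),
--     ("E4:", 6), ("E16:", 7), ("E17:", 8), ("E18:", 9), ("E15:", 10),
-- ]
-- _COLORS = ["FFC7CE", "B2EBF2", "FFE0B2", "E8F5E9", "E1BEE7",
--            "FFE0B2", "FFFDE7", "FFF9C4", "FAFAFA", "FFFDE7", "F5F5F5"]
--
-- def issue_color(issues_str: str) -> str:
--     if not issues_str or issues_str == "OK":
--         return GREEN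
--     found = set()
--     for i in range(len(issues_str)):
--         for trig, rank in _TRIGGER_RANK:
--             if issues_str.startswith(trig, i):
--                 found.add(rank)
--     for rank, color in enumerate(_COLORS):
--         if rank in found:
--             return color
--     return ORANGE
-- ===== Notes on version B (the rewrite author's own statement) =====
-- stated objective: alternative
-- what changed: Instead of trying each rule's substring test in turn, B makes one left-to-right scan over the text positions marking (in a set) which rule-classes occur anywhere, then a priority pass over the 11 classes returns the first occurring class's color; the GREEN guard and ORANGE default are kept.
import Mathlib
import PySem

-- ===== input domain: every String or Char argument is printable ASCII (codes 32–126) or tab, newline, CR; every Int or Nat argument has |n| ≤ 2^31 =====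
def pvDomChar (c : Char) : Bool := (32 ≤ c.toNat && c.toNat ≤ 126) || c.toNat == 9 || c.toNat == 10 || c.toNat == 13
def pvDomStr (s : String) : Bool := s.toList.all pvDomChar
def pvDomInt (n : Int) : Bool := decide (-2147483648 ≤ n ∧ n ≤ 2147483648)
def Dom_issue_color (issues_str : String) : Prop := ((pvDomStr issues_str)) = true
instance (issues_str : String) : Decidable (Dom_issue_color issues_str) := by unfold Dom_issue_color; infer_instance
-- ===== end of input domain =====

-- B replaces per-rule substring tests by one positional scan of the text that records which
-- rule-classes occur, followed by a priority pass over the classes (objective: alternative).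

-- ===== PORT A =====
-- literal if-chain transliteration of A
def issue_color (issues_str : String) : String :=
  if issues_str.toList = [] ∨ issues_str.toList = "OK".toList then "C6EFCE"
  else if PySem.Str.isIn "E2:" issues_str then "FFC7CE"
  else if PySem.Str.isIn "AI_MISMATCH" issues_str then "B2EBF2"
  else if PySem.Str.isIn "MANUAL_CHECK" issues_str then "FFE0B2"
  else if PySem.Str.isIn "AI_SUGGEST" issues_str then "E8F5E9"
  else if ["E5:", "E6:", "E10:", "E11:", "E12:"].any (fun c => PySem.Str.isIn c issues_str) then "E1BEE7"
  else if ["E8:", "E9:", "E7:", "E13:", "E14:"].any (fun c => PySem.Str.isIn c issues_str) then "FFE0B2"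
  else if PySem.Str.isIn "E4:" issues_str then "FFFDE7"
  else if PySem.Str.isIn "E16:" issues_str then "FFF9C4"
  else if PySem.Str.isIn "E17:" issues_str then "FAFAFA"
  else if PySem.Str.isIn "E18:" issues_str then "FFFDE7"
  else if PySem.Str.isIn "E15:" issues_str then "F5F5F5"
  else "FFE0B2"

-- ===== PORT B =====
-- _TRIGGER_RANK of Source B: trigger substring → rule-class number
def pvTriggerRank : List (String × Int) :=
  [("E2:", 0), ("AI_MISMATCH", 1), ("MANUAL_CHECK", 2), ("AI_SUGGEST", 3),
   ("E5:", 4), ("E6:", 4), ("E10:", 4), ("E11:", 4), ("E12:", 4),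
   ("E8:", 5), ("E9:", 5), ("E7:", 5), ("E13:", 5), ("E14:", 5),
   ("E4:", 6), ("E16:", 7), ("E17:", 8), ("E18:", 9), ("E15:", 10)]

-- _COLORS of Source B: rule-class number → color
def pvColors : List String :=
  ["FFC7CE", "B2EBF2", "FFE0B2", "E8F5E9", "E1BEE7",
   "FFE0B2", "FFFDE7", "FFF9C4", "FAFAFA", "FFFDE7", "F5F5F5"]

-- the scanning double loop of Source B: for i in range(len(s)): for trig, rank in _TRIGGER_RANK: …
def pvFound (cs : List Char) : PySem.Set Int :=
  (List.range cs.length).foldl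
    (fun found i =>
      pvTriggerRank.foldl
        (fun found tr =>
          if PySem.Chars.startswith (cs.drop i) tr.1.toList then PySem.Set.add found tr.2 else found)
        found)
    PySem.Set.empty

-- the final priority loop of Source B: for rank, color in enumerate(_COLORS): if rank in found: return color
def pvPick (found : PySem.Set Int) : List (Int × String) → String
  | [] => "FFE0B2"
  | (rank, color) :: rest => if PySem.Set.contains found rank then color else pvPick found rest

def issue_color_alt (issues_str : String) : String :=
  if issues_str.toList = [] ∨ issues_str.toList = "OK".toList then "C6EFCE"
  else pvPick (pvFound issues_str.toList) (PySem.List.enumerate pvColors)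

-- ===== PRECONDITION & SPEC =====
def Spec_issue_color (issues_str : String) (out : String) : Prop := out = issue_color_alt issues_str
instance (issues_str : String) (out : String) : Decidable (Spec_issue_color issues_str out) := by unfold Spec_issue_color; infer_instance

-- ===== CLAIM (what is proved, stated in full; the proofs are below) =====
def Claim_equal_issue_color : Prop := ∀ (issues_str : String), Dom_issue_color issues_str → Spec_issue_color issues_str (issue_color issues_str)

-- ===== LEMMAS AND PROOFS =====

theorem mem_inner_fold (cs : List Char) (i : Nat) (l : List (String × Int)) (found : PySem.Set Int) (r : Int) :
    r ∈ l.foldl (fun found tr =>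
        if PySem.Chars.startswith (cs.drop i) tr.1.toList then PySem.Set.add found tr.2 else found) found ↔
      r ∈ found ∨ ∃ tr ∈ l, PySem.Chars.startswith (cs.drop i) tr.1.toList = true ∧ tr.2 = r := by
  induction l generalizing found with
  | nil => simp
  | cons hd tl ih =>
    simp only [List.foldl_cons]
    by_cases h : PySem.Chars.startswith (cs.drop i) hd.1.toList = true
    · simp [h, ih, PySem.Set.mem_add]
      tauto
    · simp [h, ih]

theorem mem_outer_fold (cs : List Char) (l : List Nat) (found : PySem.Set Int) (r : Int) :
    r ∈ l.foldl (fun found i =>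
        pvTriggerRank.foldl (fun found tr =>
          if PySem.Chars.startswith (cs.drop i) tr.1.toList then PySem.Set.add found tr.2 else found) found) found ↔
      r ∈ found ∨ ∃ i ∈ l, ∃ tr ∈ pvTriggerRank, PySem.Chars.startswith (cs.drop i) tr.1.toList = true ∧ tr.2 = r := by
  induction l generalizing found with
  | nil => simp
  | cons hd tl ih =>
    simp only [List.foldl_cons, ih, mem_inner_fold]
    constructor
    · rintro (⟨h | h⟩ | h)
      · exact Or.inl h
      · exact Or.inr ⟨hd, by simp, h⟩
      · obtain ⟨i, hi, h⟩ := h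
        exact Or.inr ⟨i, by simp [hi], h⟩
    · rintro (h | ⟨i, hi, h⟩)
      · exact Or.inl (Or.inl h)
      · rcases List.mem_cons.mp hi with rfl | hi
        · exact Or.inl (Or.inr h)
        · exact Or.inr ⟨i, hi, h⟩

-- a nonempty trigger occurs as a substring iff it starts at some scanned position
theorem exists_pos_iff_isIn (cs : List Char) (t : List Char) (ht : t ≠ []) :
    (∃ i ∈ List.range cs.length, PySem.Chars.startswith (cs.drop i) t = true) ↔
      PySem.Chars.isIn t cs = true := by
  rw [← PySem.Chars.exists_prefix_drop_iff_isIn]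
  constructor
  · rintro ⟨i, _, h⟩
    exact ⟨i, (PySem.Chars.startswith_iff _ _).mp h⟩
  · rintro ⟨j, h⟩
    refine ⟨j, ?_, (PySem.Chars.startswith_iff _ _).mpr h⟩
    simp only [List.mem_range]
    by_contra hj
    push Not at hj
    rw [List.drop_eq_nil_of_le hj] at h
    exact ht (List.prefix_nil.mp h)

theorem contains_pvFound (cs : List Char) (r : Int) :
    PySem.Set.contains (pvFound cs) r = true ↔
      ∃ tr ∈ pvTriggerRank, PySem.Chars.isIn tr.1.toList cs = true ∧ tr.2 = r := by
  rw [show PySem.Set.contains (pvFound cs) r = true ↔ r ∈ pvFound cs from by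
        simp [PySem.Set.contains]]
  unfold pvFound
  rw [mem_outer_fold]
  constructor
  · rintro (h | ⟨i, _, tr, htr, hs, hr⟩)
    · simp [PySem.Set.empty] at h
    · refine ⟨tr, htr, ?_, hr⟩
      have hne : tr.1.toList ≠ [] := by
        fin_cases htr <;> simp
      exact (exists_pos_iff_isIn cs tr.1.toList hne).mp ⟨i, by
        simp only [List.mem_range]
        by_contra hi
        push Not at hi
        rw [List.drop_eq_nil_of_le hi] at hs
        exact hne ((PySem.Chars.startswith_iff _ _).mp hs |> List.prefix_nil.mp), hs⟩
  · rintro ⟨tr, htr, hin, hr⟩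
    have hne : tr.1.toList ≠ [] := by fin_cases htr <;> simp
    obtain ⟨i, hi, hs⟩ := (exists_pos_iff_isIn cs tr.1.toList hne).mpr hin
    exact Or.inr ⟨i, hi, tr, htr, hs, hr⟩

-- ===== VERDICT (by name: the statement is the Claim_ definition above) =====
theorem issue_color_spec : Claim_equal_issue_color := by
  intro s _
  unfold Spec_issue_color issue_color issue_color_alt
  by_cases h0 : s.toList = [] ∨ s.toList = "OK".toList
  · rw [if_pos h0, if_pos h0]
  · rw [if_neg h0, if_neg h0]
    have hr := contains_pvFound s.toList
    have c0 := hr 0; have c1 := hr 1; have c2 := hr 2; have c3 := hr 3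
    have c4 := hr 4; have c5 := hr 5; have c6 := hr 6; have c7 := hr 7
    have c8 := hr 8; have c9 := hr 9; have c10 := hr 10
    simp [pvTriggerRank] at c0 c1 c2 c3 c4 c5 c6 c7 c8 c9 c10
    simp only [pvColors, PySem.List.enumerate_cons, PySem.List.enumerate_nil, pvPick]
    norm_num only
    simp only [PySem.Str.isIn_eq, List.any_cons, List.any_nil, Bool.or_eq_true, Bool.false_eq_true, or_false]
    simp [c0, c1, c2, c3, c4, c5, c6, c7, c8, c9, c10]
    rfl
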